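-- pv_equiv track=rewrite | github.com/JustinShih21/Survivor-Fantasy | scripts/point_simulation/src/roster_generator.py | get_tribes
-- ===== SOURCE A (Python) =====
-- from typing import Dict, List, Any, Optional
--
-- def get_tribes(contestants: List[Dict]) -> Dict[str, List[str]]:
--     """Get contestant IDs grouped by starting tribe."""
--     tribes = {}
--     for c in contestants:
--         tribe = c["starting_tribe"]
--         if tribe not in tribes:
--             tribes[tribe] = []
--         tribes[tribe].append(c["id"])
--     return tribes
-- ===== SOURCE B (Python) =====
-- def get_tribes(contestants):
--     """Get contestant IDs grouped by starting tribe."""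
--     order = dict.fromkeys(c["starting_tribe"] for c in contestants)
--     return {t: [c["id"] for c in contestants if c["starting_tribe"] == t]
--             for t in order}
-- ===== Notes on version B (the rewrite author's own statement) =====
-- stated objective: alternative
-- what changed: Replaces the single incremental dict-building pass (create-bucket-then-append per contestant) by a two-phase grouping: collect the distinct tribes in first-occurrence order with dict.fromkeys, then build each tribe's id list in one comprehension scan per tribe.
import Mathlib
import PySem

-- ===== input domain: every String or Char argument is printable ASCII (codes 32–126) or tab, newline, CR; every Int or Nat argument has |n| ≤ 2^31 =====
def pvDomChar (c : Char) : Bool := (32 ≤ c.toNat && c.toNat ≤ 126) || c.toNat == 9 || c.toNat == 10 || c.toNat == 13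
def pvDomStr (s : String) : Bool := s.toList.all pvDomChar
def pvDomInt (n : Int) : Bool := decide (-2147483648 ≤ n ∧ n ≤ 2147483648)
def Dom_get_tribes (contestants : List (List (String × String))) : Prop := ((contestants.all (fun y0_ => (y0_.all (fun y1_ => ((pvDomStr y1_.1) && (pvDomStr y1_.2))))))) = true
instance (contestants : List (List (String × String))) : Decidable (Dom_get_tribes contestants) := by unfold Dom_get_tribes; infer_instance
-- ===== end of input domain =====

-- B groups by a distinct-tribes pass plus one comprehension scan per tribe, instead of A's
-- incremental dict building (objective: alternative decomposition, same results).


-- c[k] on a Python dict passed in as an association list: first match (exact inside Pre_,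
-- which guarantees the key is present; the "" default is never reached there).
def pyItem (c : List (String × String)) (k : String) : String :=
  ((PySem.Dict.mk c).get? k).getD ""

-- ===== PORT A =====
def get_tribes (contestants : List (List (String × String))) : List (String × List String) :=
  (contestants.foldl (fun tribes c =>
      let tribe := pyItem c "starting_tribe"
      let tribes := if tribes.contains tribe then tribes else tribes.insert tribe []
      tribes.modify tribe [] (· ++ [pyItem c "id"]))
    PySem.Dict.empty).items

-- ===== PORT B =====
def get_tribes_alt (contestants : List (List (String × String))) : List (String × List String) :=
  let order := PySem.Set.ofList (contestants.map (fun c => pyItem c "starting_tribe"))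
  order.map (fun t =>
    (t, (contestants.filter (fun c => pyItem c "starting_tribe" == t)).map
          (fun c => pyItem c "id")))

-- ===== PRECONDITION & SPEC =====
-- A raises KeyError when a contestant lacks the "starting_tribe" or "id" key; exactly those inputs are excluded.
def Pre_get_tribes (contestants : List (List (String × String))) : Prop :=
  ∀ c ∈ contestants, (PySem.Dict.mk c).contains "starting_tribe" = true ∧ (PySem.Dict.mk c).contains "id" = true
instance (contestants : List (List (String × String))) : Decidable (Pre_get_tribes contestants) := by unfold Pre_get_tribes; infer_instance
def pvWitness_get_tribes : (List (List (String × String))) :=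
  [[("starting_tribe", "Tagi"), ("id", "c1")], [("starting_tribe", "Pagong"), ("id", "c2")]]
def Spec_get_tribes (contestants : List (List (String × String))) (out : List (String × List String)) : Prop := out = get_tribes_alt contestants
instance (contestants : List (List (String × String))) (out : List (String × List String)) : Decidable (Spec_get_tribes contestants out) := by unfold Spec_get_tribes; infer_instance

-- ===== CLAIM (what is proved, stated in full; the proofs are below) =====
def Claim_equal_get_tribes : Prop := ∀ (contestants : List (List (String × String))), Dom_get_tribes contestants → Pre_get_tribes contestants → Spec_get_tribes contestants (get_tribes contestants)

-- ===== LEMMAS AND PROOFS =====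

-- A's "create empty bucket if absent, then append" equals a single modify-with-default.
theorem step_eq_modify (d : PySem.Dict String (List String)) (k v : String) :
    (if d.contains k then d else d.insert k []).modify k [] (· ++ [v]) =
      d.modify k [] (· ++ [v]) := by
  by_cases h : d.contains k = true
  · simp [h]
  · simp only [h, if_neg, Bool.false_eq_true, not_false_eq_true]
    simp [PySem.Dict.modify, PySem.Dict.getD_insert_self, PySem.Dict.insert_insert_self,
      PySem.Dict.getD_of_not_contains d _ (by simpa using h)]

theorem get_tribes_fold_eq (contestants : List (List (String × String))) :
    get_tribes contestants =
      ((contestants.map (fun c => (pyItem c "starting_tribe", pyItem c "id"))).foldl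
        (fun d p => d.modify p.1 [] (· ++ [p.2])) PySem.Dict.empty).items := by
  unfold get_tribes
  rw [List.foldl_map]
  congr 1
  apply PySem.List.foldl_congr_mem
  intro d c _
  exact step_eq_modify d _ _

-- ===== VERDICT (by name: the statement is the Claim_ definition above) =====
theorem get_tribes_spec : Claim_equal_get_tribes := by
  intro contestants _ _
  show get_tribes contestants = get_tribes_alt contestants
  rw [get_tribes_fold_eq]
  set pairs := contestants.map (fun c => (pyItem c "starting_tribe", pyItem c "id")) with hpairs
  set d := pairs.foldl (fun d p => d.modify p.1 [] (· ++ [p.2])) PySem.Dict.empty with hd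
  have hnd : d.keys.Nodup := by
    rw [hd]
    exact PySem.Dict.nodup_keys_foldl_modify_key pairs (·.1) [] (fun d p => (· ++ [p.2])) _
      (by simp [PySem.Dict.keys_empty])
  have hkeys : d.keys = PySem.Set.ofList (pairs.map (·.1)) := by
    rw [hd]
    rw [PySem.Dict.keys_foldl_modify_key pairs (·.1) [] (fun d p => (· ++ [p.2]))]
    simp [PySem.Dict.keys_empty, PySem.Set.update_nil_left]
  have hget : ∀ t, d.getD t [] = (pairs.filter (fun p => p.1 == t)).map (·.2) := by
    intro t
    rw [hd, PySem.Dict.getD_foldl_modify_append]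
    simp [PySem.Dict.getD_empty]
  rw [PySem.Dict.items_eq_map_keys d hnd [], hkeys]
  unfold get_tribes_alt
  have hmk : pairs.map (·.1) = contestants.map (fun c => pyItem c "starting_tribe") := by
    rw [hpairs]; simp
  rw [hmk]
  apply List.map_congr_left
  intro t _
  refine Prod.ext rfl ?_
  rw [hget t, hpairs]
  rw [List.filter_map, List.map_map]
  rfl
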